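-- pv_equiv track=rewrite | github.com/sds2317884/Algorithm | Programmers/Lv.1/Programmers_1-20.py | solution
-- ===== SOURCE A (Python) =====
-- def solution(absolutes, signs):
--     sum = 0
--     for i in range(len(absolutes)):
--         if signs[i] == False:
--             sum += absolutes[i] * -1
--         else:
--             sum += absolutes[i]
--     return sum
-- ===== SOURCE B (Python) =====
-- def solution(absolutes, signs):
--     total = sum(absolutes)
--     neg = 0
--     for a, s in zip(absolutes, signs):
--         if s == False:
--             neg += a
--     return total - 2 * neg
-- ===== Notes on version B (the rewrite author's own statement) =====
-- stated objective: alternative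
-- what changed: Replaces the indexed signed-accumulation loop with a sum-then-correct decomposition: total = sum(absolutes), neg = sum of absolutes paired with a False sign via zip, result = total - 2*neg.
import Mathlib
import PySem

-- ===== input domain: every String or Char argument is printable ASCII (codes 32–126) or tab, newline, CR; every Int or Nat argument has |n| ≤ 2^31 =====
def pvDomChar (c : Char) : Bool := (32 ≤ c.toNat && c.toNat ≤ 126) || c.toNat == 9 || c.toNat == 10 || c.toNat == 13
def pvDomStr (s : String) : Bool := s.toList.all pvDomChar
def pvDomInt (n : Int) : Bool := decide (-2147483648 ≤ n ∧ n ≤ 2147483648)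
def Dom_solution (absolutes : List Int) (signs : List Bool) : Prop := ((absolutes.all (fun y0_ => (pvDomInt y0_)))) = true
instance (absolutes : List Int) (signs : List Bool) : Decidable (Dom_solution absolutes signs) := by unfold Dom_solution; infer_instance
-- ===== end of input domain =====

-- B replaces A's indexed signed-accumulation loop by sum(absolutes) minus twice the
-- False-signed part gathered over zip(absolutes, signs) (objective: alternative decomposition).


-- ===== PORT A =====
def solution (absolutes : List Int) (signs : List Bool) : Int :=
  (PySem.List.pyRange 0 absolutes.length 1).foldl
    (fun s i =>
      if PySem.List.pyGetD signs i false == false then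
        s + PySem.List.pyGetD absolutes i 0 * (-1)
      else
        s + PySem.List.pyGetD absolutes i 0)
    0

-- ===== PORT B =====
def solution_alt (absolutes : List Int) (signs : List Bool) : Int :=
  let total := absolutes.sum
  let neg := (absolutes.zip signs).foldl
    (fun n p => if p.2 == false then n + p.1 else n) 0
  total - 2 * neg

-- ===== PRECONDITION & SPEC =====
-- Pre_ excludes exactly the inputs where A raises IndexError (signs shorter than absolutes).
def Pre_solution (absolutes : List Int) (signs : List Bool) : Prop :=
  absolutes.length ≤ signs.length
instance (absolutes : List Int) (signs : List Bool) : Decidable (Pre_solution absolutes signs) := by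
  unfold Pre_solution; infer_instance
def pvWitness_solution : List Int × List Bool := ([1, -2, 3], [true, false, true])

def Spec_solution (absolutes : List Int) (signs : List Bool) (out : Int) : Prop :=
  out = solution_alt absolutes signs
instance (absolutes : List Int) (signs : List Bool) (out : Int) : Decidable (Spec_solution absolutes signs out) := by
  unfold Spec_solution; infer_instance

-- ===== CLAIM (what is proved, stated in full; the proofs are below) =====
def Claim_equal_solution : Prop := ∀ (absolutes : List Int) (signs : List Bool), Dom_solution absolutes signs → Pre_solution absolutes signs → Spec_solution absolutes signs (solution absolutes signs)

-- ===== LEMMAS AND PROOFS =====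

-- A's loop body and B's neg-loop body, named for the lemmas.
def pvBodyA (absolutes : List Int) (signs : List Bool) (s : Int) (i : Int) : Int :=
  if PySem.List.pyGetD signs i false == false then
    s + PySem.List.pyGetD absolutes i 0 * (-1)
  else
    s + PySem.List.pyGetD absolutes i 0

def pvBodyNeg (n : Int) (p : Int × Bool) : Int :=
  if p.2 == false then n + p.1 else n

-- A's range-indexed fold, started at index j, equals a fold over the zipped suffixes.
theorem pvRangeFold_eq_zipFold (la : List Int) :
    ∀ (ls : List Bool) (absolutes : List Int) (signs : List Bool) (j : ℕ) (acc : Int),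
      absolutes.drop j = la → signs.drop j = ls → la.length ≤ ls.length →
      (PySem.List.pyRange (j : Int) absolutes.length 1).foldl (pvBodyA absolutes signs) acc
        = (la.zip ls).foldl (fun s p => if p.2 == false then s + p.1 * (-1) else s + p.1) acc := by
  induction la with
  | nil =>
    intro ls absolutes signs j acc hda hds _
    have hj : absolutes.length ≤ j := by
      by_contra h
      have := List.drop_eq_nil_iff.mp hda
      omega
    rw [PySem.List.pyRange_one_eq_nil (by exact_mod_cast hj)]
    simp
  | cons a t ih =>
    intro ls absolutes signs j acc hda hds hlen
    cases ls with
    | nil => simp at hlen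
    | cons s ts =>
      have hj : j < absolutes.length := by
        by_contra h
        have : absolutes.drop j = [] := List.drop_eq_nil_iff.mpr (by omega)
        rw [this] at hda; exact absurd hda (by simp)
      have hjs : j < signs.length := by
        by_contra h
        have : signs.drop j = [] := List.drop_eq_nil_iff.mpr (by omega)
        rw [this] at hds; exact absurd hds (by simp)
      have hga : absolutes[j]? = some a := by
        have : (absolutes.drop j)[0]? = absolutes[j + 0]? := List.getElem?_drop
        rw [hda] at this; simpa using this.symm
      have hgs : signs[j]? = some s := by
        have : (signs.drop j)[0]? = signs[j + 0]? := List.getElem?_drop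
        rw [hds] at this; simpa using this.symm
      rw [PySem.List.pyRange_one_cons (by exact_mod_cast hj)]
      rw [List.foldl_cons]
      have hstep : pvBodyA absolutes signs acc (j : Int)
          = (if s == false then acc + a * (-1) else acc + a) := by
        unfold pvBodyA
        rw [PySem.List.pyGetD_natCast, PySem.List.pyGetD_natCast]
        simp [List.getD, hga, hgs]
      have hda' : absolutes.drop (j + 1) = t := by
        have : absolutes.drop (j + 1) = (absolutes.drop j).drop 1 := by
          rw [List.drop_drop]
        rw [this, hda]; simp
      have hds' : signs.drop (j + 1) = ts := by
        have : signs.drop (j + 1) = (signs.drop j).drop 1 := by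
          rw [List.drop_drop]
        rw [this, hds]; simp
      have hcast : ((j : Int) + 1) = ((j + 1 : ℕ) : Int) := by push_cast; ring
      rw [hstep, hcast, ih ts absolutes signs (j + 1) _ hda' hds' (by simpa using hlen)]
      simp [List.zip_cons_cons]

-- shift the accumulator out of B's neg fold
theorem pvNegFold_shift (l : List (Int × Bool)) :
    ∀ acc : Int, l.foldl pvBodyNeg acc = acc + l.foldl pvBodyNeg 0 := by
  induction l with
  | nil => intro acc; simp
  | cons p t ih =>
    intro acc
    rw [List.foldl_cons, List.foldl_cons, ih, ih (pvBodyNeg 0 p)]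
    unfold pvBodyNeg
    split_ifs <;> ring

-- the signed fold equals the fst-sum minus twice the neg fold
theorem pvSignedFold_eq (l : List (Int × Bool)) :
    ∀ acc : Int,
      l.foldl (fun s p => if p.2 == false then s + p.1 * (-1) else s + p.1) acc
        = acc + (l.map Prod.fst).sum - 2 * l.foldl pvBodyNeg 0 := by
  induction l with
  | nil => intro acc; simp
  | cons p t ih =>
    intro acc
    rw [List.foldl_cons, List.foldl_cons, ih, pvNegFold_shift t (pvBodyNeg 0 p)]
    unfold pvBodyNeg
    simp only [List.map_cons, List.sum_cons]
    split_ifs <;> ring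

-- ===== VERDICT (by name: the statement is the Claim_ definition above) =====
theorem solution_spec : Claim_equal_solution := by
  intro absolutes signs _ hpre
  unfold Spec_solution solution solution_alt
  have h0 : (PySem.List.pyRange ((0 : ℕ) : Int) absolutes.length 1).foldl (pvBodyA absolutes signs) 0
      = ((absolutes.zip signs).foldl (fun s p => if p.2 == false then s + p.1 * (-1) else s + p.1) 0) := by
    exact pvRangeFold_eq_zipFold absolutes signs absolutes signs 0 0 (by simp) (by simp)
      (by simpa [List.length_zip] using hpre)
  have h1 := h0
  rw [pvSignedFold_eq] at h1
  have hfst : ((absolutes.zip signs).map Prod.fst) = absolutes :=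
    List.map_fst_zip hpre
  rw [hfst] at h1
  simp only [Nat.cast_zero] at h1
  calc (PySem.List.pyRange 0 absolutes.length 1).foldl
        (fun s i => if PySem.List.pyGetD signs i false == false then
          s + PySem.List.pyGetD absolutes i 0 * (-1) else s + PySem.List.pyGetD absolutes i 0) 0
      = (PySem.List.pyRange 0 absolutes.length 1).foldl (pvBodyA absolutes signs) 0 := rfl
    _ = 0 + absolutes.sum - 2 * (absolutes.zip signs).foldl pvBodyNeg 0 := h1
    _ = absolutes.sum - 2 * (absolutes.zip signs).foldl
          (fun n p => if p.2 == false then n + p.1 else n) 0 := by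
        rw [zero_add]; rfl
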